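-- pv_equiv track=rewrite | github.com/SimGus/Chatette | chatette/parsing/parser_utils.py | add_escapement_back_in_group
-- ===== SOURCE A (Python) =====
-- COMMENT_SYM_DEPRECATED = ';'
--
-- COMMENT_MARKER = '//'
--
-- ESCAPE_SYM = '\\'
--
-- ALIAS_SYM = '~'
--
-- SLOT_SYM = '@'
--
-- INTENT_SYM = '%'
--
-- UNIT_OPEN_SYM = '['  # This shouldn't be changed
--
-- UNIT_CLOSE_SYM = ']'  # id.
--
-- CHOICE_OPEN_SYM = r'{'
--
-- CHOICE_CLOSE_SYM = r'}'
--
-- RAND_GEN_SYM = '?'  # This shouldn't be changed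
--
-- PERCENT_GEN_SYM = '/'
--
-- CASE_GEN_SYM = '&'
--
-- ARG_SYM = '$'  # This shouldn't be changed
--
-- def add_escapement_back_for_not_comments(text):
--     """
--     Considering that `text` contains no comment,
--     escape comment markers and returns the new text.
--     This function is needed because comment markers are several characters long.
--     @pre: there is no comments anymore in `text`.
--     """
--     return text.replace(COMMENT_MARKER, ESCAPE_SYM+COMMENT_MARKER)
--
-- def add_escapement_back_in_group(text):
--     """
--     Put escapement back where it belongs in word groups
--     where escapement has been removed.
--     """
--     escaped_text = ""
--     for c in text:
--         if (   c == ESCAPE_SYM or is_boundary_sym(c)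
--             or is_group_modifier_sym(c) or is_comment_sym(c)):
--             escaped_text += ESCAPE_SYM + c
--         else:
--             escaped_text += c
--     escaped_text = add_escapement_back_for_not_comments(escaped_text)
--     return escaped_text.replace(ESCAPE_SYM+ESCAPE_SYM+ARG_SYM, ESCAPE_SYM+ARG_SYM)
--
-- def is_comment_sym(text):
--     """Returns `True` iff `text` is a symbol introducing a comment."""
--     return text in (COMMENT_MARKER, COMMENT_SYM_DEPRECATED)
--
-- def is_boundary_sym(text):
--     """
--     Returns `True` iff `text` is a symbol
--     that makes the boundaries of special sub-rules.
--     """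
--     return text in (ALIAS_SYM, SLOT_SYM, INTENT_SYM, UNIT_OPEN_SYM,
--                     UNIT_CLOSE_SYM, CHOICE_OPEN_SYM, CHOICE_CLOSE_SYM)
--
-- def is_group_modifier_sym(text):
--     """
--     Returns `True` iff `text` is a special symbol introducing a modifier that
--     can label word groups.
--     """
--     return text in (CASE_GEN_SYM, RAND_GEN_SYM, PERCENT_GEN_SYM)
-- ===== SOURCE B (Python) =====
-- SPECIALS = frozenset('\\~@%[]{}&?/;')
--
-- def add_escapement_back_in_group(text):
--     """
--     Single left-to-right pass with one-character lookahead: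
--     a backslash immediately followed by '$' stays a lone backslash
--     (what A's final '\\\\$' -> '\\$' replace produces), every other
--     special character gets an escape prepended; no post-processing
--     replace passes are needed ('//' can never survive the escaping).
--     """
--     out = []
--     n = len(text)
--     for i, c in enumerate(text):
--         if c == '\\' and i + 1 < n and text[i + 1] == '$':
--             out.append(c)
--         elif c in SPECIALS:
--             out.append('\\' + c)
--         else:
--             out.append(c)
--     return ''.join(out)
-- ===== Notes on version B (the rewrite author's own statement) =====
-- stated objective: faster
-- what changed: Replaces A's per-char string accumulation followed by two whole-string replace passes with a single left-to-right pass using one-character lookahead: a backslash directly followed by '$' is emitted alone (the effect of A's escaped-escape-before-ARG replace), every other special char gets an escape prepended, and the comment-marker replace is dropped because a doubled slash can never occur in the escaped text.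
import Mathlib
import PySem

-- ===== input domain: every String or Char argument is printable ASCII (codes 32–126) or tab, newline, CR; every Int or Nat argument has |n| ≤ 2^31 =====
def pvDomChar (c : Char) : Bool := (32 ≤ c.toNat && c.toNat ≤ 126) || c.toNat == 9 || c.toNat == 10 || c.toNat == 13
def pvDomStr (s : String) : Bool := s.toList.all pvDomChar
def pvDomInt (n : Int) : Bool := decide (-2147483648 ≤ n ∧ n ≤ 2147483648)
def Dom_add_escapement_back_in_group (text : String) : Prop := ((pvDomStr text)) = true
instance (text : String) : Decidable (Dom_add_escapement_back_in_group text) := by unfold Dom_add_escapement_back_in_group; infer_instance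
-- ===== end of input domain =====

-- B: one lookahead pass (list build + join) instead of per-char concatenation plus two replace passes; measured faster in a timing run.
-- pass with one-character lookahead (alternative decomposition, same outputs).

-- ===== PORT A =====
-- Python's is_comment_sym checks membership in ('//', ';'); a single character can
-- only ever equal ';', so on the loop's one-char arguments this is exact.
def pvIsCommentSym (c : Char) : Bool := c == ';'
def pvIsBoundarySym (c : Char) : Bool :=
  c == '~' || c == '@' || c == '%' || c == '[' || c == ']' || c == '{' || c == '}'
def pvIsGroupModifierSym (c : Char) : Bool := c == '&' || c == '?' || c == '/'
def pvAddEscapementBackForNotComments (text : String) : String :=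
  PySem.Str.replace text "//" "\\//"
def add_escapement_back_in_group (text : String) : String :=
  let escaped_text := text.toList.foldl
    (fun acc c =>
      if c == '\\' || pvIsBoundarySym c || pvIsGroupModifierSym c || pvIsCommentSym c then
        acc ++ String.ofList ['\\', c]
      else
        acc ++ String.ofList [c]) ""
  let escaped_text := pvAddEscapementBackForNotComments escaped_text
  PySem.Str.replace escaped_text "\\\\$" "\\$"

-- ===== PORT B =====
def pvSpecials : List Char := ['\\', '~', '@', '%', '[', ']', '{', '}', '&', '?', '/', ';']
def pvEscGo : List Char → List Char
  | [] => []
  | c :: rest =>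
      (if c == '\\' && rest.head? == some '$' then [c]
       else if pvSpecials.contains c then ['\\', c]
       else [c]) ++ pvEscGo rest
def add_escapement_back_in_group_alt (text : String) : String :=
  String.ofList (pvEscGo text.toList)

-- ===== PRECONDITION & SPEC =====
def Spec_add_escapement_back_in_group (text : String) (out : String) : Prop := out = add_escapement_back_in_group_alt text
instance (text : String) (out : String) : Decidable (Spec_add_escapement_back_in_group text out) := by unfold Spec_add_escapement_back_in_group; infer_instance

-- ===== CLAIM (what is proved, stated in full; the proofs are below) =====
def Claim_equal_add_escapement_back_in_group : Prop := ∀ (text : String), Dom_add_escapement_back_in_group text → Spec_add_escapement_back_in_group text (add_escapement_back_in_group text)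

-- ===== LEMMAS AND PROOFS =====

-- A's escaping condition and the per-character output block of A's loop.
def eACond (c : Char) : Bool :=
  c == '\\' || pvIsBoundarySym c || pvIsGroupModifierSym c || pvIsCommentSym c
def eBlock (c : Char) : List Char := if eACond c then ['\\', c] else [c]
def eMap (t : List Char) : List Char := t.flatMap eBlock

lemma eMap_nil : eMap [] = [] := rfl
lemma eMap_cons (c : Char) (v : List Char) : eMap (c :: v) = eBlock c ++ eMap v := by
  simp [eMap]

lemma contains_eq_eACond (c : Char) : pvSpecials.contains c = eACond c := by
  by_cases h : c ∈ pvSpecials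
  · fin_cases h <;> rfl
  · have h1 : pvSpecials.contains c = false := by simpa using h
    have h2 : eACond c = false := by
      by_contra hx
      have hx' : eACond c = true := by simpa using hx
      refine h ?_
      simp only [eACond, pvIsBoundarySym, pvIsGroupModifierSym, pvIsCommentSym,
        Bool.or_eq_true, beq_iff_eq] at hx'
      simp only [pvSpecials, List.mem_cons, List.not_mem_nil, or_false]
      tauto
    rw [h1, h2]

lemma head_eMap_ne_slash (v : List Char) : (eMap v).head? ≠ some '/' := by
  cases v with
  | nil => simp [eMap]
  | cons c w =>
    by_cases h : eACond c
    · simp [eMap_cons, eBlock, h]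
    · have hc : c ≠ '/' := by intro hh; subst hh; exact h (by decide)
      simp [eMap_cons, eBlock, h, hc, Ne.symm hc]

lemma head_eMap_dollar (v : List Char) : (eMap v).head? = some '$' ↔ v.head? = some '$' := by
  cases v with
  | nil => simp [eMap]
  | cons c w =>
    by_cases h : eACond c
    · have hc : c ≠ '$' := by intro hh; subst hh; exact absurd h (by decide)
      simp [eMap_cons, eBlock, h, hc, Ne.symm hc]
    · simp [eMap_cons, eBlock, h]

lemma not_prefix_slashDollar (v : List Char) : (['\\', '$'].isPrefixOf (eMap v)) = false := by
  cases v with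
  | nil => simp [eMap]
  | cons c w =>
    by_cases h : eACond c
    · have hc : c ≠ '$' := by intro hc; subst hc; exact absurd h (by decide)
      simp [eMap_cons, eBlock, h, List.isPrefixOf, hc, Ne.symm hc]
    · have hc : c ≠ '\\' := by intro hc; subst hc; exact absurd h (by decide)
      simp [eMap_cons, eBlock, h, List.isPrefixOf, hc, Ne.symm hc]

lemma go_zero (old new l acc : List Char) :
    PySem.Chars.replace.go old new 0 l acc = acc.reverse ++ l := by
  rw [PySem.Chars.replace.go.eq_def]

lemma go_nil (old new : List Char) (f : Nat) (acc : List Char) :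
    PySem.Chars.replace.go old new (f + 1) [] acc = acc.reverse := by
  rw [PySem.Chars.replace.go.eq_def]

lemma go_succ (old new : List Char) (f : Nat) (c : Char) (t acc : List Char) :
    PySem.Chars.replace.go old new (f + 1) (c :: t) acc =
      if old.isPrefixOf (c :: t) then
        PySem.Chars.replace.go old new f (List.drop old.length (c :: t)) (new.reverse ++ acc)
      else
        PySem.Chars.replace.go old new f t (c :: acc) := by
  rw [PySem.Chars.replace.go.eq_def]

-- The '//' → '\//' replace never fires on escaped text: every '/' there is escaped.
lemma go_slash (fuel : Nat) : ∀ (u acc : List Char), (eMap u).length ≤ fuel →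
    PySem.Chars.replace.go ['/', '/'] ['\\', '/', '/'] fuel (eMap u) acc = acc.reverse ++ eMap u := by
  induction fuel using Nat.strong_induction_on with
  | _ fuel ih =>
    intro u acc hle
    match u with
    | [] =>
      rw [eMap_nil]
      cases fuel with
      | zero => rw [go_zero]
      | succ f => rw [go_nil]; simp
    | c :: v =>
      by_cases hc : eACond c
      · have hlen : 2 + (eMap v).length ≤ fuel := by
          rw [eMap_cons, eBlock, if_pos hc] at hle; simp at hle; omega
        obtain ⟨f, rfl⟩ : ∃ f, fuel = f + 2 := ⟨fuel - 2, by omega⟩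
        rw [eMap_cons, eBlock, if_pos hc]
        simp only [List.cons_append, List.nil_append]
        have hp1 : (['/', '/'].isPrefixOf ('\\' :: c :: eMap v)) = false := by
          simp [List.isPrefixOf]
        have hp2 : (['/', '/'].isPrefixOf (c :: eMap v)) = false := by
          by_cases hcs : c = '/'
          · subst hcs
            have hone : (['/'].isPrefixOf (eMap v)) = false := by
              cases hE : eMap v with
              | nil => simp [List.isPrefixOf]
              | cons d w =>
                have hd := head_eMap_ne_slash v
                rw [hE] at hd
                simp only [List.head?_cons, ne_eq, Option.some.injEq] at hd
                simp [List.isPrefixOf, hd, Ne.symm hd]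
            simp only [List.isPrefixOf] at hone ⊢
            simp [hone]
          · simp [List.isPrefixOf, hcs, Ne.symm hcs]
        show PySem.Chars.replace.go _ _ ((f + 1) + 1) _ _ = _
        rw [go_succ, if_neg (by rw [hp1]; simp), go_succ, if_neg (by rw [hp2]; simp)]
        rw [ih f (by omega) v (c :: '\\' :: acc) (by omega)]
        simp
      · have hlen : 1 + (eMap v).length ≤ fuel := by
          rw [eMap_cons, eBlock, if_neg hc] at hle; simp at hle; omega
        obtain ⟨f, rfl⟩ : ∃ f, fuel = f + 1 := ⟨fuel - 1, by omega⟩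
        rw [eMap_cons, eBlock, if_neg hc]
        have hcs : c ≠ '/' := by
          intro h; subst h; exact absurd (by decide : eACond '/' = true) (by simpa using hc)
        rw [List.singleton_append, go_succ, if_neg (by simp [List.isPrefixOf, hcs, Ne.symm hcs])]
        rw [ih f (by omega) v (c :: acc) (by omega)]
        simp

-- The '\\$' → '\$' replace on escaped text is exactly B's lookahead rule.
lemma go_dollar (fuel : Nat) : ∀ (u acc : List Char), (eMap u).length ≤ fuel →
    PySem.Chars.replace.go ['\\', '\\', '$'] ['\\', '$'] fuel (eMap u) acc = acc.reverse ++ pvEscGo u := by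
  induction fuel using Nat.strong_induction_on with
  | _ fuel ih =>
    intro u acc hle
    match u with
    | [] =>
      rw [eMap_nil]
      cases fuel with
      | zero => rw [go_zero]; simp [pvEscGo]
      | succ f => rw [go_nil]; simp [pvEscGo]
    | c :: v =>
      by_cases h1 : c = '\\' ∧ v.head? = some '$'
      · obtain ⟨rfl, hv⟩ := h1
        obtain ⟨w, rfl⟩ : ∃ w, v = '$' :: w := by
          cases v with
          | nil => simp at hv
          | cons d w => simp only [List.head?_cons, Option.some.injEq] at hv; exact ⟨w, by rw [hv]⟩
        have hEq : eMap ('\\' :: '$' :: w) = '\\' :: '\\' :: '$' :: eMap w := by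
          rw [eMap_cons, eMap_cons, eBlock, eBlock, if_pos (by decide), if_neg (by decide)]
          simp
        have hlen : 3 + (eMap w).length ≤ fuel := by rw [hEq] at hle; simp at hle; omega
        obtain ⟨f, rfl⟩ : ∃ f, fuel = f + 1 := ⟨fuel - 1, by omega⟩
        rw [hEq, go_succ, if_pos (by simp [List.isPrefixOf])]
        have hdrop : List.drop (['\\', '\\', '$'] : List Char).length
            ('\\' :: '\\' :: '$' :: eMap w) = eMap w := by simp
        rw [hdrop, ih f (by omega) w (['\\', '$'].reverse ++ acc) (by omega)]
        have hB : pvEscGo ('\\' :: '$' :: w) = ['\\', '$'] ++ pvEscGo w := by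
          rw [pvEscGo, if_pos (by simp), pvEscGo, if_neg (by simp), if_neg (by decide)]
          simp
        rw [hB]; simp
      · by_cases hc : eACond c
        · have hlen : 2 + (eMap v).length ≤ fuel := by
            rw [eMap_cons, eBlock, if_pos hc] at hle; simp at hle; omega
          obtain ⟨f, rfl⟩ : ∃ f, fuel = f + 2 := ⟨fuel - 2, by omega⟩
          rw [eMap_cons, eBlock, if_pos hc]
          simp only [List.cons_append, List.nil_append]
          have hmem : c ∈ pvSpecials := by
            have := contains_eq_eACond c
            rw [hc] at this
            simpa using this
          by_cases hcs : c = '\\'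
          · subst hcs
            have hv : v.head? ≠ some '$' := by intro h; exact h1 ⟨rfl, h⟩
            have hone : (['$'].isPrefixOf (eMap v)) = false := by
              cases hE : eMap v with
              | nil => simp [List.isPrefixOf]
              | cons d w =>
                have hd : d ≠ '$' := by
                  intro h; subst h
                  exact hv ((head_eMap_dollar v).mp (by rw [hE]; rfl))
                simp [List.isPrefixOf, hd, Ne.symm hd]
            have hp1 : (['\\', '\\', '$'].isPrefixOf ('\\' :: '\\' :: eMap v)) = false := by
              simp only [List.isPrefixOf] at hone ⊢
              simp [hone]
            have hp2 : (['\\', '\\', '$'].isPrefixOf ('\\' :: eMap v)) = false := by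
              have hsd := not_prefix_slashDollar v
              simp only [List.isPrefixOf] at hsd ⊢
              simp [hsd]
            show PySem.Chars.replace.go _ _ ((f + 1) + 1) _ _ = _
            rw [go_succ, if_neg (by rw [hp1]; simp), go_succ, if_neg (by rw [hp2]; simp)]
            rw [ih f (by omega) v ('\\' :: '\\' :: acc) (by omega)]
            have hB : pvEscGo ('\\' :: v) = ['\\', '\\'] ++ pvEscGo v := by
              rw [pvEscGo, if_neg (by simp [hv]), if_pos (by simpa using hmem)]
            rw [hB]; simp
          · have hp1 : (['\\', '\\', '$'].isPrefixOf ('\\' :: c :: eMap v)) = false := by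
              simp [List.isPrefixOf, hcs, Ne.symm hcs]
            have hp2 : (['\\', '\\', '$'].isPrefixOf (c :: eMap v)) = false := by
              simp [List.isPrefixOf, hcs, Ne.symm hcs]
            show PySem.Chars.replace.go _ _ ((f + 1) + 1) _ _ = _
            rw [go_succ, if_neg (by rw [hp1]; simp), go_succ, if_neg (by rw [hp2]; simp)]
            rw [ih f (by omega) v (c :: '\\' :: acc) (by omega)]
            have hB : pvEscGo (c :: v) = ['\\', c] ++ pvEscGo v := by
              rw [pvEscGo, if_neg (by simp [hcs]), if_pos (by simpa using hmem)]
            rw [hB]; simp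
        · have hlen : 1 + (eMap v).length ≤ fuel := by
            rw [eMap_cons, eBlock, if_neg hc] at hle; simp at hle; omega
          obtain ⟨f, rfl⟩ : ∃ f, fuel = f + 1 := ⟨fuel - 1, by omega⟩
          rw [eMap_cons, eBlock, if_neg hc]
          have hcs : c ≠ '\\' := by
            intro h; subst h; exact absurd (by decide : eACond '\\' = true) (by simpa using hc)
          have hmem : c ∉ pvSpecials := by
            intro hm
            have hct : pvSpecials.contains c = true := by simpa using hm
            rw [contains_eq_eACond] at hct
            exact hc hct
          rw [List.singleton_append, go_succ, if_neg (by simp [List.isPrefixOf, hcs, Ne.symm hcs])]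
          rw [ih f (by omega) v (c :: acc) (by omega)]
          have hB : pvEscGo (c :: v) = [c] ++ pvEscGo v := by
            rw [pvEscGo, if_neg (by simp [hcs]), if_neg (by simpa using hmem)]
          rw [hB]; simp

lemma foldl_escape (t : List Char) : ∀ (acc : String),
    (List.foldl
      (fun acc c =>
        if c == '\\' || pvIsBoundarySym c || pvIsGroupModifierSym c || pvIsCommentSym c then
          acc ++ String.ofList ['\\', c]
        else
          acc ++ String.ofList [c]) acc t).toList = acc.toList ++ eMap t := by
  induction t with
  | nil => intro acc; simp [eMap]
  | cons c v ih =>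
    intro acc
    rw [List.foldl_cons, ih, eMap_cons]
    by_cases h : eACond c
    · rw [if_pos (by simpa [eACond] using h), eBlock, if_pos h]
      simp
    · rw [if_neg (by simpa [eACond] using h), eBlock, if_neg h]
      simp

lemma replace_on_eMap (t : List Char) :
    PySem.Chars.replace (eMap t) ['/', '/'] ['\\', '/', '/'] = eMap t := by
  rw [PySem.Chars.replace, if_neg (by simp)]
  exact go_slash (eMap t).length t [] (le_refl _)

lemma replace2_on_eMap (t : List Char) :
    PySem.Chars.replace (eMap t) ['\\', '\\', '$'] ['\\', '$'] = pvEscGo t := by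
  rw [PySem.Chars.replace, if_neg (by simp)]
  exact go_dollar (eMap t).length t [] (le_refl _)
-- ===== VERDICT (by name: the statement is the Claim_ definition above) =====
theorem add_escapement_back_in_group_spec : Claim_equal_add_escapement_back_in_group := by
  intro text _
  unfold Spec_add_escapement_back_in_group
  unfold add_escapement_back_in_group add_escapement_back_in_group_alt pvAddEscapementBackForNotComments
  apply String.toList_inj.mp
  rw [PySem.Str.toList_replace]
  have h1 : (PySem.Str.replace
      (List.foldl (fun acc c =>
        if c == '\\' || pvIsBoundarySym c || pvIsGroupModifierSym c || pvIsCommentSym c then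
          acc ++ String.ofList ['\\', c]
        else acc ++ String.ofList [c]) "" text.toList) "//" "\\//").toList = eMap text.toList := by
    rw [PySem.Str.toList_replace]
    have h0 := foldl_escape text.toList ""
    simp only [String.toList_empty, List.nil_append] at h0
    rw [h0]
    have : ("//" : String).toList = ['/', '/'] := by decide
    have h2 : ("\\//" : String).toList = ['\\', '/', '/'] := by decide
    rw [this, h2]
    exact replace_on_eMap text.toList
  rw [h1]
  have h3 : ("\\\\$" : String).toList = ['\\', '\\', '$'] := by decide
  have h4 : ("\\$" : String).toList = ['\\', '$'] := by decide
  rw [h3, h4, replace2_on_eMap, String.toList_ofList]
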